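-- pv_equiv track=rewrite | github.com/heyfei7/redtaylorsversion | file.py | getDiag
-- ===== SOURCE A (Python) =====
-- def getDiag(i, j, crossword):
--     row_n = len(crossword)
--     col_n = len(crossword[0])
--
--     def valid(a, b):
--         return (0 <= a < row_n) and (0 <= b < col_n)
--
--     i1 = i
--     j1 = j
--     i2 = i
--     j2 = j
--     s1 = ""
--     s2 = ""
--
--     while valid(i1, j1):
--         s1 += crossword[i1][j1]
--         i1 += 1
--         j1 += 1
--
--     while valid(i2, j2):
--         s2 += crossword[i2][j2]
--         i2 += 1
--         j2 -= 1
--     return s1, s2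
-- ===== SOURCE B (Python) =====
-- def getDiag(i, j, crossword):
--     row_n = len(crossword)
--     col_n = len(crossword[0])
--     if not (0 <= i < row_n and 0 <= j < col_n):
--         return ("", "")
--     L1 = min(row_n - i, col_n - j)
--     L2 = min(row_n - i, j + 1)
--     s1 = "".join(crossword[i + k][j + k] for k in range(L1))
--     s2 = "".join(crossword[i + k][j - k] for k in range(L2))
--     return (s1, s2)
-- ===== Notes on version B (the rewrite author's own statement) =====
-- stated objective: simpler
-- what changed: Replaces A's two validity-probing while-loops with a start-bounds guard plus closed-form diagonal lengths (min of remaining rows/columns) and two join-over-range comprehensions.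
import Mathlib
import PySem

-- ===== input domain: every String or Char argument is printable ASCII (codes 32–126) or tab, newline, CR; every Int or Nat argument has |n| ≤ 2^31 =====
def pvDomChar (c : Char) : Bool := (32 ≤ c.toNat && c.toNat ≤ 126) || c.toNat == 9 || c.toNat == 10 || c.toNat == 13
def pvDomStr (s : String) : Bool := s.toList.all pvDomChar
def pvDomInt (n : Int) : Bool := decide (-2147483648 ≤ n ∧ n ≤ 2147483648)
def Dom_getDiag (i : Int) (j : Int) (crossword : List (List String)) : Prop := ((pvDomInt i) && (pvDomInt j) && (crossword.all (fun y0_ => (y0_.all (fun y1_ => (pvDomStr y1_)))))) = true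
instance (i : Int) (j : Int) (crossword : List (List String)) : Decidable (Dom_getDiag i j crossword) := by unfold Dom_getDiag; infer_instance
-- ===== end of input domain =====

-- B replaces A's two validity-probing while-loops with a start guard, closed-form diagonal
-- lengths and two join-over-range comprehensions (objective: simpler; same cost).
-- ===== PORT A =====
-- the first while-loop of A (down-right): appends cells while valid, stepping i1+1, j1+1
def getDiagLoopDR (cw : List (List String)) (row_n col_n : Int) (i1 j1 : Int) (s1 : String) : String :=
  if 0 ≤ i1 ∧ i1 < row_n ∧ 0 ≤ j1 ∧ j1 < col_n then
    getDiagLoopDR cw row_n col_n (i1 + 1) (j1 + 1)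
      (s1 ++ PySem.List.pyGetD (PySem.List.pyGetD cw i1 []) j1 "")
  else s1
termination_by (row_n - i1).toNat
decreasing_by omega

-- the second while-loop of A (down-left): appends cells while valid, stepping i2+1, j2-1
def getDiagLoopDL (cw : List (List String)) (row_n col_n : Int) (i2 j2 : Int) (s2 : String) : String :=
  if 0 ≤ i2 ∧ i2 < row_n ∧ 0 ≤ j2 ∧ j2 < col_n then
    getDiagLoopDL cw row_n col_n (i2 + 1) (j2 - 1)
      (s2 ++ PySem.List.pyGetD (PySem.List.pyGetD cw i2 []) j2 "")
  else s2
termination_by (row_n - i2).toNat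
decreasing_by omega

def getDiag (i : Int) (j : Int) (crossword : List (List String)) : String × String :=
  let row_n : Int := crossword.length
  let col_n : Int := (PySem.List.pyGetD crossword 0 []).length
  (getDiagLoopDR crossword row_n col_n i j "", getDiagLoopDL crossword row_n col_n i j "")

-- ===== PORT B =====
def getDiag_alt (i : Int) (j : Int) (crossword : List (List String)) : String × String :=
  let row_n : Int := crossword.length
  let col_n : Int := (PySem.List.pyGetD crossword 0 []).length
  if 0 ≤ i ∧ i < row_n ∧ 0 ≤ j ∧ j < col_n then
    let L1 : Int := min (row_n - i) (col_n - j)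
    let L2 : Int := min (row_n - i) (j + 1)
    let s1 := PySem.Str.join "" ((PySem.List.pyRange 0 L1 1).map
      (fun k => PySem.List.pyGetD (PySem.List.pyGetD crossword (i + k) []) (j + k) ""))
    let s2 := PySem.Str.join "" ((PySem.List.pyRange 0 L2 1).map
      (fun k => PySem.List.pyGetD (PySem.List.pyGetD crossword (i + k) []) (j - k) ""))
    (s1, s2)
  else ("", "")

-- ===== PRECONDITION & SPEC =====
-- Pre_ excludes exactly the inputs on which the Python A raises IndexError: the empty grid
-- (crossword[0] raises) and grids where a diagonal step lands on a row shorter than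
-- len(crossword[0]) (crossword[i1][j1] raises).
def Pre_getDiag (i : Int) (j : Int) (crossword : List (List String)) : Prop :=
  crossword ≠ [] ∧
  ((0 ≤ i ∧ i < (crossword.length : Int) ∧ 0 ≤ j ∧ j < ((PySem.List.pyGetD crossword 0 []).length : Int)) →
    (∀ k : Nat, k < (min ((crossword.length : Int) - i) (((PySem.List.pyGetD crossword 0 []).length : Int) - j)).toNat →
      j + (k : Int) < ((PySem.List.pyGetD crossword (i + (k : Int)) []).length : Int)) ∧
    (∀ k : Nat, k < (min ((crossword.length : Int) - i) (j + 1)).toNat →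
      j - (k : Int) < ((PySem.List.pyGetD crossword (i + (k : Int)) []).length : Int)))
instance (i : Int) (j : Int) (crossword : List (List String)) : Decidable (Pre_getDiag i j crossword) := by unfold Pre_getDiag; infer_instance
def pvWitness_getDiag : Int × Int × List (List String) := (0, 0, [["a"]])

def Spec_getDiag (i : Int) (j : Int) (crossword : List (List String)) (out : String × String) : Prop := out = getDiag_alt i j crossword
instance (i : Int) (j : Int) (crossword : List (List String)) (out : String × String) : Decidable (Spec_getDiag i j crossword out) := by unfold Spec_getDiag; infer_instance

-- ===== CLAIM (what is proved, stated in full; the proofs are below) =====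
def Claim_equal_getDiag : Prop := ∀ (i : Int) (j : Int) (crossword : List (List String)), Dom_getDiag i j crossword → Pre_getDiag i j crossword → Spec_getDiag i j crossword (getDiag i j crossword)

-- ===== LEMMAS AND PROOFS =====

lemma join_empty_nil : PySem.Str.join "" ([] : List String) = "" := by
  simp [PySem.Str.join]

lemma intercalate_nil_eq_flatten (l : List (List Char)) : ([] : List Char).intercalate l = l.flatten := by
  induction l with
  | nil => simp [List.intercalate]
  | cons a t ih => cases t <;> simp_all [List.intercalate, List.intersperse]

lemma join_empty_cons (x : String) (xs : List String) :
    PySem.Str.join "" (x :: xs) = x ++ PySem.Str.join "" xs := by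
  apply String.toList_inj.mp
  simp [PySem.Str.join, PySem.Chars.join, intercalate_nil_eq_flatten]

lemma loopDR_eq (cw : List (List String)) (row_n col_n : Int) :
    ∀ (n : Nat) (i1 j1 : Int) (s1 : String), 0 ≤ i1 → 0 ≤ j1 →
    (min (row_n - i1) (col_n - j1)).toNat = n →
    getDiagLoopDR cw row_n col_n i1 j1 s1 =
      s1 ++ PySem.Str.join "" ((List.range n).map
        (fun (k : Nat) => PySem.List.pyGetD (PySem.List.pyGetD cw (i1 + (k : Int)) []) (j1 + (k : Int)) "")) := by
  intro n
  induction n with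
  | zero =>
    intro i1 j1 s1 hi hj hmin
    rw [getDiagLoopDR.eq_def, if_neg (by omega)]
    simp [join_empty_nil]
  | succ n ih =>
    intro i1 j1 s1 hi hj hmin
    rw [getDiagLoopDR.eq_def, if_pos (by omega : 0 ≤ i1 ∧ i1 < row_n ∧ 0 ≤ j1 ∧ j1 < col_n)]
    rw [ih (i1 + 1) (j1 + 1) _ (by omega) (by omega) (by omega)]
    rw [List.range_succ_eq_map, List.map_cons, List.map_map, join_empty_cons]
    rw [String.append_assoc]
    congr 1
    congr 1
    · push_cast; ring_nf
    · congr 1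
      apply List.map_congr_left
      intro k _
      simp only [Function.comp_apply, Nat.succ_eq_add_one]
      push_cast
      ring_nf

lemma loopDL_eq (cw : List (List String)) (row_n col_n : Int) :
    ∀ (n : Nat) (i2 j2 : Int) (s2 : String), 0 ≤ i2 → j2 < col_n →
    (min (row_n - i2) (j2 + 1)).toNat = n →
    getDiagLoopDL cw row_n col_n i2 j2 s2 =
      s2 ++ PySem.Str.join "" ((List.range n).map
        (fun (k : Nat) => PySem.List.pyGetD (PySem.List.pyGetD cw (i2 + (k : Int)) []) (j2 - (k : Int)) "")) := by
  intro n
  induction n with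
  | zero =>
    intro i2 j2 s2 hi hj hmin
    rw [getDiagLoopDL.eq_def, if_neg (by omega)]
    simp [join_empty_nil]
  | succ n ih =>
    intro i2 j2 s2 hi hj hmin
    rw [getDiagLoopDL.eq_def, if_pos (by omega : 0 ≤ i2 ∧ i2 < row_n ∧ 0 ≤ j2 ∧ j2 < col_n)]
    rw [ih (i2 + 1) (j2 - 1) _ (by omega) (by omega) (by omega)]
    rw [List.range_succ_eq_map, List.map_cons, List.map_map, join_empty_cons]
    rw [String.append_assoc]
    congr 1
    congr 1
    · push_cast; ring_nf
    · congr 1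
      apply List.map_congr_left
      intro k _
      simp only [Function.comp_apply, Nat.succ_eq_add_one]
      push_cast
      ring_nf

-- ===== VERDICT (by name: the statement is the Claim_ definition above) =====
theorem getDiag_spec : Claim_equal_getDiag := by
  intro i j cw _ _
  show getDiag i j cw = getDiag_alt i j cw
  unfold getDiag getDiag_alt
  by_cases hv : 0 ≤ i ∧ i < (cw.length : Int) ∧ 0 ≤ j ∧ j < ((PySem.List.pyGetD cw 0 []).length : Int)
  · simp only [if_pos hv]
    obtain ⟨hi0, hi1, hj0, hj1⟩ := hv
    rw [loopDR_eq cw _ _ _ i j "" hi0 hj0 rfl, loopDL_eq cw _ _ _ i j "" hi0 hj1 rfl]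
    simp only [Prod.mk.injEq]
    refine ⟨?_, ?_⟩ <;>
    · rw [PySem.List.pyRange_one, List.map_map]
      simp
      congr 1
  · simp only [if_neg hv]
    rw [getDiagLoopDR.eq_def, if_neg hv, getDiagLoopDL.eq_def, if_neg hv]
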